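-- pv_equiv track=rewrite | github.com/yoon-yoo-tak/algorithm-challenge-with-loop | yoon-yoo-tak/26-01-07/389481.py | rank_to_string
-- ===== SOURCE A (Python) =====
-- pow26 = [1] * 12
--
-- def rank_to_string(r: int) -> str:
--     L = 1
--     while L <= 11 and r > pow26[L]:
--         r -= pow26[L]
--         L += 1
--     pos = r
--     lex_index = pos - 1
--     chars = []
--     for _ in range(L):
--         chars.append(chr(ord('a') + (lex_index % 26)))
--         lex_index //= 26
--     chars.reverse()
--     return ''.join(chars)
-- ===== SOURCE B (Python) =====
-- def rank_to_string(r: int) -> str: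
--     # closed-form for A's while loop: L = min(12, r) capped below at 1
--     L = 12 if r >= 12 else (r if r > 1 else 1)
--     lex = r - L
--     s = ""
--     for _ in range(L):
--         s = chr(ord('a') + lex % 26) + s
--         lex //= 26
--     return s
-- ===== Notes on version B (the rewrite author's own statement) =====
-- stated objective: simpler
-- what changed: Replaces A's iterative while-loop over the all-ones pow26 table with closed-form arithmetic (L = min(12, max(r,1)), lex = r - L) and builds the string by prepending digits instead of append-then-reverse.
import Mathlib
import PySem

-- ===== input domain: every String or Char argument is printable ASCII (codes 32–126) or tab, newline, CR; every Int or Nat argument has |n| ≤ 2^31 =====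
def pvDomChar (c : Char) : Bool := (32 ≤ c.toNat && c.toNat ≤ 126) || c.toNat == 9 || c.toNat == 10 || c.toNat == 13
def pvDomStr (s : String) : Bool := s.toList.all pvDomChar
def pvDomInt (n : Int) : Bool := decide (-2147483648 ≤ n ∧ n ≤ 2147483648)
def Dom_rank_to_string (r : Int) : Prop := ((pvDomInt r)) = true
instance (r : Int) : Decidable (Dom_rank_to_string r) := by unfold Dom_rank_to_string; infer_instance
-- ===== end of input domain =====

-- B replaces A's step-by-step while loop by closed-form arithmetic for L and lex,
-- and builds the string by prepending digits instead of appending then reversing (objective: simpler).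

-- ===== PORT A =====
-- module-level table: pow26 = [1] * 12
def pow26 : List Int := List.replicate 12 1

-- shared one-liner: chr(ord('a') + lex % 26)
def pvDigit (lex : Int) : Char := Char.ofNat (97 + (PySem.Int.mod lex 26).toNat)

-- while L <= 11 and r > pow26[L]: r -= pow26[L]; L += 1
-- pow26[L]: in range whenever the guard L ≤ 11 holds, hence getD 0 is exact there
def pvPow (L : Nat) : Int := (PySem.List.pyGet? pow26 (L : Int)).getD 0

-- fuel (= 12) only bounds the recursion; the Python guard L ≤ 11 limits it to 11 iterations,
-- so fuel never runs out.
def loopA : Nat → Nat → Int → Nat × Int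
  | 0, L, r => (L, r)
  | fuel+1, L, r =>
    if L ≤ 11 ∧ r > pvPow L then loopA fuel (L+1) (r - pvPow L)
    else (L, r)

-- for _ in range(L): chars.append(chr(...)); lex //= 26   — produced in iteration order
def charsA : Nat → Int → List Char
  | 0, _ => []
  | n+1, lex => pvDigit lex :: charsA n (PySem.Int.floordiv lex 26)

def rank_to_string (r : Int) : String :=
  let lr := loopA 12 1 r
  let lex := lr.2 - 1
  String.mk ((charsA lr.1 lex).reverse)

-- ===== PORT B =====
-- for _ in range(L): s = chr(...) + s; lex //= 26   — prepends, no reverse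
def charsB : Nat → Int → List Char
  | 0, _ => []
  | n+1, lex => charsB n (PySem.Int.floordiv lex 26) ++ [pvDigit lex]

def rank_to_string_alt (r : Int) : String :=
  let L : Int := if r ≥ 12 then 12 else if r > 1 then r else 1
  let lex := r - L
  String.mk (charsB L.toNat lex)

-- ===== PRECONDITION & SPEC =====
def Spec_rank_to_string (r : Int) (out : String) : Prop := out = rank_to_string_alt r
instance (r : Int) (out : String) : Decidable (Spec_rank_to_string r out) := by unfold Spec_rank_to_string; infer_instance

-- ===== CLAIM (what is proved, stated in full; the proofs are below) =====
def Claim_equal_rank_to_string : Prop := ∀ (r : Int), Dom_rank_to_string r → Spec_rank_to_string r (rank_to_string r)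

-- ===== LEMMAS AND PROOFS =====

lemma charsA_reverse (n : Nat) : ∀ lex : Int, (charsA n lex).reverse = charsB n lex := by
  induction n with
  | zero => intro lex; rfl
  | succ k ih => intro lex; simp [charsA, charsB, ih]

lemma pvPow_le (L : Nat) (h : L ≤ 11) : pvPow L = 1 := by
  interval_cases L <;> decide

-- the while loop takes min (12 - L) (r - 1).toNat unit steps
lemma loopA_char : ∀ (fuel L : Nat) (r : Int), 1 ≤ L → L + fuel = 13 →
    loopA fuel L r = (L + min (12 - L) (r - 1).toNat, r - min (12 - L) (r - 1).toNat) := by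
  intro fuel
  induction fuel with
  | zero =>
    intro L r h1 h2
    simp only [loopA, Prod.mk.injEq]
    constructor <;> omega
  | succ f ih =>
    intro L r h1 h2
    rw [loopA]
    by_cases hL : L ≤ 11
    · rw [pvPow_le L hL]
      by_cases hr : r > 1
      · rw [if_pos ⟨hL, hr⟩, ih (L + 1) (r - 1) (by omega) (by omega)]
        simp only [Prod.mk.injEq]
        constructor <;> omega
      · rw [if_neg (fun h => hr h.2)]
        simp only [Prod.mk.injEq]
        constructor <;> omega
    · rw [if_neg (fun h => hL h.1)]
      simp only [Prod.mk.injEq]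
      constructor <;> omega

lemma chars_key (n m : Nat) (x y : Int) (h1 : n = m) (h2 : x = y) :
    String.mk (charsA n x).reverse = String.mk (charsB m y) := by
  subst h1; subst h2; rw [charsA_reverse]

-- ===== VERDICT (by name: the statement is the Claim_ definition above) =====
theorem rank_to_string_spec : Claim_equal_rank_to_string := by
  intro r _
  unfold Spec_rank_to_string rank_to_string rank_to_string_alt
  simp only [loopA_char 12 1 r le_rfl (by norm_num)]
  split_ifs <;> (apply chars_key <;> omega)
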